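-- pv_equiv track=rewrite | github.com/pkuy/-search_algorithm | Bonus.py | count
-- ===== SOURCE A (Python) =====
-- def count(Way,point):      #Way là lish đường đi, point là list chứa các điểm thưởng
--     k=0
--     for i in range(len(Way)):
--         if i%2==0:
--             k+=1
--             for j in range(len(point)):
--                 if Way[i]==point[j][0] and Way[i+1]==point[j][1]:
--                     k=k+point[j][2]
--     return k
-- ===== SOURCE B (Python) =====
-- def count(Way, point):
--     # Index the path once: pairs[x][y] = how many path steps sit at cell (x, y).
--     pairs = {}
--     for i in range(1, len(Way), 2):
--         x, y = Way[i - 1], Way[i]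
--         sub = pairs.get(x, {})
--         sub[y] = sub.get(y, 0) + 1
--         pairs[x] = sub
--     # One lookup per bonus point instead of rescanning point per path step.
--     k = (len(Way) + 1) // 2
--     for p in point:
--         sub = pairs.get(p[0])
--         if sub is not None and p[1] in sub:
--             k += sub[p[1]] * p[2]
--     return k
-- ===== Notes on version B (the rewrite author's own statement) =====
-- stated objective: faster
-- what changed: B indexes the path once in a nested dictionary (x -> y -> multiplicity of the path pair) and then makes a single O(1)-lookup pass over the point list, eliminating A's inner rescan of the whole point list at every even path index.
-- outside the precondition, e.g. on count([], [[]]): A returns 0, B raises IndexError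
-- crash fix: On odd-length paths whose last lone cell matches some bonus entry's x-coordinate (all of B's own accesses in range), A raises IndexError reading Way[i+1] past the end while B returns the normal count. — e.g. on count([5], [[5, 1, 10]]): A raises IndexError, B returns 1
import Mathlib
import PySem

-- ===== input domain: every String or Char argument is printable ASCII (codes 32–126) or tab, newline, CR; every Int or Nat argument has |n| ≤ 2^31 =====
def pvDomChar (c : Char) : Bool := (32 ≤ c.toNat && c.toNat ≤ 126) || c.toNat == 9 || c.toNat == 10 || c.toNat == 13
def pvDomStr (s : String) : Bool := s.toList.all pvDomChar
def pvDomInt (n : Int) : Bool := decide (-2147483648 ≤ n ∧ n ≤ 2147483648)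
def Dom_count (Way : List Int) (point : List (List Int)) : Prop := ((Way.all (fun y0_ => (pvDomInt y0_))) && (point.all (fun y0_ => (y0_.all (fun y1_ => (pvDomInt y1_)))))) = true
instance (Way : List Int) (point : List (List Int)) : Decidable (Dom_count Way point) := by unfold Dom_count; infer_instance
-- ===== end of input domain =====

-- B indexes the path's cell pairs once in a nested dictionary (x → y → multiplicity)
-- and then makes one lookup per bonus point, replacing A's rescan of the whole point
-- list at every even path index (objective: faster, asymptotic).

-- ===== PORT A =====
def count (Way : List Int) (point : List (List Int)) : Int :=
  (PySem.List.pyRange 0 (Way.length : Int) 1).foldl (fun k i =>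
    if PySem.Int.mod i 2 = 0 then
      (PySem.List.pyRange 0 (point.length : Int) 1).foldl (fun k j =>
        if PySem.List.pyGetD Way i 0 = PySem.List.pyGetD (PySem.List.pyGetD point j []) 0 0 ∧
           PySem.List.pyGetD Way (i + 1) 0 = PySem.List.pyGetD (PySem.List.pyGetD point j []) 1 0
        then k + PySem.List.pyGetD (PySem.List.pyGetD point j []) 2 0
        else k) (k + 1)
    else k) 0

-- ===== PORT B =====
-- (list indexing is ported with pyGetD: exact on Pre_count, where every index B's
-- Python reads is in range)
def count_alt (Way : List Int) (point : List (List Int)) : Int :=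
  let pairs : PySem.Dict Int (PySem.Dict Int Int) :=
    (PySem.List.pyRange 1 (Way.length : Int) 2).foldl (fun d i =>
      let x := PySem.List.pyGetD Way (i - 1) 0
      let y := PySem.List.pyGetD Way i 0
      let sub := d.getD x PySem.Dict.empty
      d.insert x (sub.insert y (sub.getD y 0 + 1))) PySem.Dict.empty
  point.foldl (fun k p =>
    match pairs.get? (PySem.List.pyGetD p 0 0) with
    | none => k
    | some sub =>
        if sub.contains (PySem.List.pyGetD p 1 0)
        then k + sub.getD (PySem.List.pyGetD p 1 0) 0 * PySem.List.pyGetD p 2 0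
        else k)
    (PySem.Int.floordiv ((Way.length : Int) + 1) 2)

-- ===== PRECONDITION & SPEC =====
-- Pre_count excludes exactly the inputs where one of the Pythons raises IndexError:
-- a point entry too short for the accesses its matching forces (A and B both raise
-- there, except that an empty entry with an empty path is returned by A — never
-- reached — and raises in B's indexing pass), and an odd-length path whose last lone
-- cell matches some entry's x-coordinate, where A raises on Way[i+1] (B returns;
-- see Raises_count below).
def Pre_count (Way : List Int) (point : List (List Int)) : Prop :=
  (∀ p ∈ point, 1 ≤ p.length) ∧
  (∀ p ∈ point, p.length = 1 →
    ∀ t ∈ List.range (Way.length / 2), Way.getD (2 * t) 0 ≠ p.getD 0 0) ∧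
  (∀ p ∈ point, p.length = 2 →
    ∀ t ∈ List.range (Way.length / 2),
      ¬(Way.getD (2 * t) 0 = p.getD 0 0 ∧ Way.getD (2 * t + 1) 0 = p.getD 1 0)) ∧
  (Way.length % 2 = 1 → ∀ p ∈ point, Way.getD (Way.length - 1) 0 ≠ p.getD 0 0)
instance (Way : List Int) (point : List (List Int)) : Decidable (Pre_count Way point) := by
  unfold Pre_count; infer_instance

def pvWitness_count : List Int × List (List Int) := ([1, 2, 3, 4], [[1, 2, 5], [3, 4, 7]])

-- On inputs where B's accesses are all in range (no empty entry, no 1- or 2-element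
-- entry whose prefix matches a path pair) but the path has odd length and its last
-- lone cell matches some entry's x-coordinate, A raises IndexError reading Way[i+1]
-- past the end; B never reads past the last full pair and returns the normal count.
def Raises_count (Way : List Int) (point : List (List Int)) : Prop :=
  (∀ p ∈ point, 1 ≤ p.length) ∧
  (∀ p ∈ point, p.length = 1 →
    ∀ t ∈ List.range (Way.length / 2), Way.getD (2 * t) 0 ≠ p.getD 0 0) ∧
  (∀ p ∈ point, p.length = 2 →
    ∀ t ∈ List.range (Way.length / 2),
      ¬(Way.getD (2 * t) 0 = p.getD 0 0 ∧ Way.getD (2 * t + 1) 0 = p.getD 1 0)) ∧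
  Way.length % 2 = 1 ∧
  ∃ p ∈ point, Way.getD (Way.length - 1) 0 = p.getD 0 0
instance (Way : List Int) (point : List (List Int)) : Decidable (Raises_count Way point) := by
  unfold Raises_count; infer_instance

def pvRaiseWitness_count : List Int × List (List Int) := ([5], [[5, 1, 10]])
def pvRaiseWitnessOut_count : Int := 1

def Spec_count (Way : List Int) (point : List (List Int)) (out : Int) : Prop := out = count_alt Way point
instance (Way : List Int) (point : List (List Int)) (out : Int) : Decidable (Spec_count Way point out) := by unfold Spec_count; infer_instance

-- ===== CLAIM (what is proved, stated in full; the proofs are below) =====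
def Claim_equal_count : Prop := ∀ (Way : List Int) (point : List (List Int)), Dom_count Way point → Pre_count Way point → Spec_count Way point (count Way point)
def Claim_raises_count : Prop := (∀ (Way : List Int) (point : List (List Int)), Dom_count Way point → Raises_count Way point → ¬ Pre_count Way point) ∧ (Dom_count (pvRaiseWitness_count.1) (pvRaiseWitness_count.2) ∧ Raises_count (pvRaiseWitness_count.1) (pvRaiseWitness_count.2) ∧ count_alt (pvRaiseWitness_count.1) (pvRaiseWitness_count.2) = pvRaiseWitnessOut_count)

-- ===== LEMMAS AND PROOFS =====

-- the bonus added at even path position k for one point entry p, as A computes it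
def pvBon (Way p : List Int) (k : Nat) : Int :=
  if Way.getD k 0 = p.getD 0 0 ∧ Way.getD (k + 1) 0 = p.getD 1 0 then p.getD 2 0 else 0

-- the multiplicity B's nested dictionary stores for a cell pair (x, y)
def pvPairCnt (d : PySem.Dict Int (PySem.Dict Int Int)) (x y : Int) : Int :=
  (d.get? x).elim 0 (fun sub => if sub.contains y then sub.getD y 0 else 0)

-- one iteration of B's indexing pass, over Nat step numbers
def pvStep (Way : List Int) (d : PySem.Dict Int (PySem.Dict Int Int)) (t : Nat) :
    PySem.Dict Int (PySem.Dict Int Int) :=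
  (d.insert (Way.getD (2 * t) 0)
    ((d.getD (Way.getD (2 * t) 0) PySem.Dict.empty).insert (Way.getD (2 * t + 1) 0)
      ((d.getD (Way.getD (2 * t) 0) PySem.Dict.empty).getD (Way.getD (2 * t + 1) 0) 0 + 1)))

-- one insertion into the nested dictionary bumps exactly the multiplicity of (a, b)
lemma pv_one_step (d : PySem.Dict Int (PySem.Dict Int Int)) (a b x y : Int) :
    pvPairCnt (d.insert a ((d.getD a PySem.Dict.empty).insert b
        ((d.getD a PySem.Dict.empty).getD b 0 + 1))) x y
      = pvPairCnt d x y + (if a = x ∧ b = y then 1 else 0) := by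
  unfold pvPairCnt
  rw [PySem.Dict.get?_insert, PySem.Dict.getD_eq_get?_getD]
  by_cases hx : x = a
  · subst hx
    rw [if_pos rfl, Option.elim_some]
    cases hget : d.get? x with
    | none =>
        simp only [Option.getD_none, Option.elim_none]
        by_cases hy : b = y
        · subst hy
          rw [if_pos (PySem.Dict.contains_insert_self _ _ _), PySem.Dict.getD_insert_self]
          simp [PySem.Dict.getD_empty]
        · rw [PySem.Dict.contains_insert]
          simp only [PySem.Dict.contains_empty, beq_iff_eq, Bool.or_false]
          have hyb : (y = b) = False := eq_false (fun h => hy h.symm)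
          simp [hyb, hy]
    | some sub0 =>
        simp only [Option.getD_some, Option.elim_some]
        by_cases hy : b = y
        · subst hy
          rw [if_pos (PySem.Dict.contains_insert_self _ _ _), PySem.Dict.getD_insert_self]
          by_cases hc : sub0.contains b = true
          · simp [hc]
          · rw [if_neg (by simpa using hc),
              PySem.Dict.getD_of_not_contains sub0 0 (by simpa using hc)]
            simp
        · rw [PySem.Dict.contains_insert, PySem.Dict.getD_insert]
          have hyb : (y = b) = False := eq_false (fun h => hy h.symm)
          simp [hyb, hy]
  · rw [if_neg hx, if_neg (fun h => hx h.1.symm)]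
    simp

-- one conditional bonus addition of port A, reduced to pvBon
lemma pv_step (Way p : List Int) (i : Nat) (k : Int) :
    (if PySem.List.pyGetD Way (i : Int) 0 = PySem.List.pyGetD p 0 0 ∧
        PySem.List.pyGetD Way ((i : Int) + 1) 0 = PySem.List.pyGetD p 1 0
     then k + PySem.List.pyGetD p 2 0 else k) = k + pvBon Way p i := by
  have h1 : ((i : Int) + 1) = ((i + 1 : Nat) : Int) := by push_cast; ring
  rw [h1]
  simp only [pvBon]
  have e0 : PySem.List.pyGetD p (0 : Int) (0 : Int) = p.getD 0 0 := by simp [pysem]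
  have e1 : PySem.List.pyGetD p (1 : Int) (0 : Int) = p.getD 1 0 := by simp [pysem]
  have e2 : PySem.List.pyGetD p (2 : Int) (0 : Int) = p.getD 2 0 := by simp [pysem]
  have ew : ∀ m : Nat, PySem.List.pyGetD Way ((m : Nat) : Int) (0 : Int) = Way.getD m 0 := by
    intro m; simp [pysem]
  rw [e0, e1, e2, ew, ew]
  split <;> simp

-- l.map f written as a map over the index range
lemma pv_map_getD_range {α β : Type} (l : List α) (d : α) (f : α → β) :
    (List.range l.length).map (fun j => f (l.getD j d)) = l.map f := by
  apply List.ext_getElem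
  · simp
  · intro i h1 h2
    simp [List.getD_eq_getElem?_getD, List.getElem?_eq_getElem (by simpa using h2)]

-- a sum over the even indices below n re-indexed to range ((n+1)/2)
lemma pv_even_sum (F : Nat → Int) (n : Nat) :
    ((List.range n).map (fun k => if k % 2 = 0 then F k else 0)).sum
      = ((List.range ((n + 1) / 2)).map (fun t => F (2 * t))).sum := by
  induction n with
  | zero => simp
  | succ n ih =>
      rw [List.range_succ, List.map_append, List.sum_append, ih]
      by_cases h : n % 2 = 0
      · have h2 : (n + 1 + 1) / 2 = (n + 1) / 2 + 1 := by omega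
        have h3 : 2 * ((n + 1) / 2) = n := by omega
        rw [h2, List.range_succ, List.map_append, List.sum_append]
        simp [h, h3]
      · have h2 : (n + 1 + 1) / 2 = (n + 1) / 2 := by omega
        rw [h2]
        simp [h]

-- port A as a single sum over the even positions
lemma pv_count_eq (Way : List Int) (point : List (List Int)) :
    count Way point
      = ((List.range ((Way.length + 1) / 2)).map (fun t =>
          1 + (point.map (fun p => pvBon Way p (2 * t))).sum)).sum := by
  unfold count
  rw [PySem.List.pyRange_zero_nat Way.length, List.foldl_map]
  have houter : (fun (k : Int) (i : Nat) =>
      if PySem.Int.mod (i : Int) 2 = 0 then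
        (PySem.List.pyRange 0 (point.length : Int) 1).foldl (fun k j =>
          if PySem.List.pyGetD Way (i : Int) 0 = PySem.List.pyGetD (PySem.List.pyGetD point j []) 0 0 ∧
             PySem.List.pyGetD Way ((i : Int) + 1) 0 = PySem.List.pyGetD (PySem.List.pyGetD point j []) 1 0
          then k + PySem.List.pyGetD (PySem.List.pyGetD point j []) 2 0
          else k) (k + 1)
      else k)
      = (fun (k : Int) (i : Nat) =>
          k + (if i % 2 = 0 then 1 + (point.map (fun p => pvBon Way p i)).sum else 0)) := by
    funext k i
    have hm : PySem.Int.mod (i : Int) 2 = ((i % 2 : Nat) : Int) := by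
      exact_mod_cast PySem.Int.mod_natCast i 2
    rw [hm]
    by_cases h : i % 2 = 0
    · rw [PySem.List.pyRange_zero_nat point.length, List.foldl_map]
      have hpt : ∀ j : Nat, PySem.List.pyGetD point ((j : Nat) : Int) ([] : List Int) = point.getD j [] := by
        intro j; simp [pysem]
      simp only [hpt, pv_step, PySem.List.foldl_add,
        pv_map_getD_range point [] (fun p => pvBon Way p i), h]
      simp
      ring
    · rw [if_neg (by exact_mod_cast h : ¬ (((i % 2 : Nat) : Int) = 0)), if_neg h]
      ring
  rw [houter, PySem.List.foldl_add]
  rw [pv_even_sum (fun i => 1 + (point.map (fun p => pvBon Way p i)).sum) Way.length]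
  simp

-- the odd-index stride-2 range, re-indexed over Nat
lemma pv_odd_range (n : Nat) :
    PySem.List.pyRange 1 (n : Int) 2
      = (List.range (n / 2)).map (fun t => ((2 * t + 1 : Nat) : Int)) := by
  rw [PySem.List.pyRange_of_pos 1 (n : Int) (by norm_num)]
  have hcnt : (if (1 : Int) < (n : Int) then (((n : Int) - 1 + 2 - 1) / 2).toNat else 0) = n / 2 := by
    by_cases h : 1 < n
    · rw [if_pos (by exact_mod_cast h)]
      have he : ((n : Int) - 1 + 2 - 1) = (n : Int) := by ring
      rw [he]; omega
    · rw [if_neg (by omega)]; omega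
  rw [hcnt]
  apply List.map_congr_left
  intro t _
  push_cast; ring

-- B's indexing pass counts each cell pair: the stored multiplicity of (x, y)
lemma pv_build_cnt (Way : List Int) (ts : List Nat)
    (d : PySem.Dict Int (PySem.Dict Int Int)) (x y : Int) :
    pvPairCnt (ts.foldl (pvStep Way) d) x y
      = pvPairCnt d x y
        + ((ts.countP (fun t => decide (Way.getD (2 * t) 0 = x ∧ Way.getD (2 * t + 1) 0 = y))) : Int) := by
  induction ts generalizing d with
  | nil => simp
  | cons t rest ih =>
      rw [List.foldl_cons, ih, List.countP_cons]
      unfold pvStep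
      rw [pv_one_step d (Way.getD (2 * t) 0) (Way.getD (2 * t + 1) 0) x y]
      by_cases h : Way.getD (2 * t) 0 = x ∧ Way.getD (2 * t + 1) 0 = y
      · rw [if_pos h, if_pos (by simpa using h)]
        push_cast; ring
      · rw [if_neg h, if_neg (by simpa using h)]
        push_cast; ring

-- port B as the closed-form count plus one multiplicity-weighted term per point entry
lemma pv_count_alt_eq (Way : List Int) (point : List (List Int)) :
    count_alt Way point
      = ((Way.length + 1) / 2 : Nat)
        + (point.map (fun p =>
            ((List.range (Way.length / 2)).countP (fun t =>
              decide (Way.getD (2 * t) 0 = p.getD 0 0 ∧ Way.getD (2 * t + 1) 0 = p.getD 1 0)) : Int)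
            * p.getD 2 0)).sum := by
  unfold count_alt
  have hk0 : PySem.Int.floordiv ((Way.length : Int) + 1) 2 = ((Way.length + 1) / 2 : Nat) := by
    exact_mod_cast PySem.Int.floordiv_natCast (Way.length + 1) 2
  rw [pv_odd_range Way.length, List.foldl_map]
  have ew : ∀ m : Nat, PySem.List.pyGetD Way ((m : Nat) : Int) (0 : Int) = Way.getD m 0 := by
    intro m; simp [pysem]
  have hbuild : (fun (d : PySem.Dict Int (PySem.Dict Int Int)) (t : Nat) =>
      let x := PySem.List.pyGetD Way (((2 * t + 1 : Nat) : Int) - 1) 0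
      let y := PySem.List.pyGetD Way ((2 * t + 1 : Nat) : Int) 0
      let sub := d.getD x PySem.Dict.empty
      d.insert x (sub.insert y (sub.getD y 0 + 1))) = pvStep Way := by
    funext d t
    have hi : (((2 * t + 1 : Nat) : Int) - 1) = ((2 * t : Nat) : Int) := by push_cast; ring
    simp only [hi, ew]
    rfl
  rw [hbuild]
  have hstep : (fun (k : Int) (p : List Int) =>
      match ((List.range (Way.length / 2)).foldl (pvStep Way) PySem.Dict.empty).get?
          (PySem.List.pyGetD p 0 0) with
      | none => k
      | some sub =>
          if sub.contains (PySem.List.pyGetD p 1 0)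
          then k + sub.getD (PySem.List.pyGetD p 1 0) 0 * PySem.List.pyGetD p 2 0
          else k)
      = (fun (k : Int) (p : List Int) =>
          k + ((List.range (Way.length / 2)).countP (fun t =>
              decide (Way.getD (2 * t) 0 = p.getD 0 0 ∧ Way.getD (2 * t + 1) 0 = p.getD 1 0)) : Int)
            * p.getD 2 0) := by
    funext k p
    have e0 : PySem.List.pyGetD p (0 : Int) (0 : Int) = p.getD 0 0 := by simp [pysem]
    have e1 : PySem.List.pyGetD p (1 : Int) (0 : Int) = p.getD 1 0 := by simp [pysem]
    have e2 : PySem.List.pyGetD p (2 : Int) (0 : Int) = p.getD 2 0 := by simp [pysem]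
    have hcnt := pv_build_cnt Way (List.range (Way.length / 2)) PySem.Dict.empty
      (p.getD 0 0) (p.getD 1 0)
    rw [e0, e1, e2]
    simp only [pvPairCnt, PySem.Dict.get?_empty, Option.elim_none, zero_add] at hcnt
    cases hget : ((List.range (Way.length / 2)).foldl (pvStep Way) PySem.Dict.empty).get?
        (p.getD 0 0) with
    | none =>
        rw [hget] at hcnt
        simp only [Option.elim_none] at hcnt
        have hc0 : (((List.range (Way.length / 2)).countP (fun t =>
            decide (Way.getD (2 * t) 0 = p.getD 0 0 ∧ Way.getD (2 * t + 1) 0 = p.getD 1 0))) : Int)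
            = 0 := by omega
        show k = k + (((List.range (Way.length / 2)).countP (fun t =>
            decide (Way.getD (2 * t) 0 = p.getD 0 0 ∧ Way.getD (2 * t + 1) 0 = p.getD 1 0))) : Int)
          * p.getD 2 0
        rw [hc0]; ring
    | some sub =>
        rw [hget] at hcnt
        simp only [Option.elim_some] at hcnt
        show (if sub.contains (p.getD 1 0) = true
            then k + sub.getD (p.getD 1 0) 0 * p.getD 2 0 else k)
          = k + (((List.range (Way.length / 2)).countP (fun t =>
              decide (Way.getD (2 * t) 0 = p.getD 0 0 ∧ Way.getD (2 * t + 1) 0 = p.getD 1 0))) : Int)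
            * p.getD 2 0
        by_cases hc : sub.contains (p.getD 1 0) = true
        · rw [if_pos hc]
          rw [if_pos hc] at hcnt
          rw [← hcnt]
        · rw [if_neg hc]
          rw [if_neg hc] at hcnt
          rw [← hcnt]; ring
  simp only [hstep]
  rw [PySem.List.foldl_add, hk0]

-- a sum of a constant over the matching elements is count times the constant
lemma pv_cnt_mul (l : List Nat) (q : Nat → Bool) (c : Int) :
    (l.map (fun t => if q t = true then c else 0)).sum = (l.countP q : Int) * c := by
  induction l with
  | nil => simp
  | cons t rest ih =>
      rw [List.map_cons, List.sum_cons, ih, List.countP_cons]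
      by_cases h : q t = true
      · rw [if_pos h, if_pos h]
        push_cast; ring
      · rw [if_neg h, if_neg h]
        push_cast; ring

-- Fubini for list sums
lemma pv_sum_swap {α β : Type} (l1 : List α) (l2 : List β) (F : α → β → Int) :
    (l1.map (fun x => (l2.map (fun y => F x y)).sum)).sum
      = (l2.map (fun y => (l1.map (fun x => F x y)).sum)).sum := by
  induction l1 with
  | nil => simp
  | cons a t ih =>
      simp only [List.map_cons, List.sum_cons, ih, ← PySem.List.sum_map_add_int]

-- ===== VERDICT (by name: the statement is the Claim_ definition above) =====
theorem count_spec : Claim_equal_count := by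
  intro Way point _ hpre
  unfold Spec_count
  rw [pv_count_eq, pv_count_alt_eq]
  rw [show (fun (t : Nat) => 1 + (point.map (fun p => pvBon Way p (2 * t))).sum)
      = (fun (t : Nat) => (1 : Int) + (point.map (fun p => pvBon Way p (2 * t))).sum) from rfl]
  rw [PySem.List.sum_map_add_int (List.range ((Way.length + 1) / 2)) (fun _ => (1 : Int))
      (fun t => (point.map (fun p => pvBon Way p (2 * t))).sum)]
  rw [PySem.List.sum_map_const_int]
  have hper : ∀ p : List Int,
      ((List.range (Way.length / 2)).map (fun t => pvBon Way p (2 * t))).sum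
        = ((List.range (Way.length / 2)).countP (fun t =>
            decide (Way.getD (2 * t) 0 = p.getD 0 0 ∧ Way.getD (2 * t + 1) 0 = p.getD 1 0)) : Int)
          * p.getD 2 0 := by
    intro p
    rw [← pv_cnt_mul (List.range (Way.length / 2))
        (fun t => decide (Way.getD (2 * t) 0 = p.getD 0 0 ∧ Way.getD (2 * t + 1) 0 = p.getD 1 0))
        (p.getD 2 0)]
    apply congrArg List.sum
    apply List.map_congr_left
    intro t _
    unfold pvBon
    by_cases h : Way.getD (2 * t) 0 = p.getD 0 0 ∧ Way.getD (2 * t + 1) 0 = p.getD 1 0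
    · rw [if_pos h, if_pos (by simpa using h)]
    · rw [if_neg h, if_neg (by simpa using h)]
  have hmain : ((List.range (Way.length / 2)).map (fun t =>
      (point.map (fun p => pvBon Way p (2 * t))).sum)).sum
      = (point.map (fun p =>
          ((List.range (Way.length / 2)).countP (fun t =>
            decide (Way.getD (2 * t) 0 = p.getD 0 0 ∧ Way.getD (2 * t + 1) 0 = p.getD 1 0)) : Int)
          * p.getD 2 0)).sum := by
    rw [pv_sum_swap (List.range (Way.length / 2)) point (fun t p => pvBon Way p (2 * t))]
    exact congrArg List.sum (List.map_congr_left (fun p _ => hper p))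
  by_cases hodd : Way.length % 2 = 1
  · have hsplit : (Way.length + 1) / 2 = Way.length / 2 + 1 := by omega
    rw [hsplit, List.range_succ, List.map_append, List.sum_append]
    have hzero : (point.map (fun p => pvBon Way p (2 * (Way.length / 2)))).sum = 0 := by
      have h2 : 2 * (Way.length / 2) = Way.length - 1 := by omega
      have hz : ∀ p ∈ point, pvBon Way p (2 * (Way.length / 2)) = 0 := by
        intro p hp
        unfold pvBon
        rw [if_neg]
        intro ⟨h01, _⟩
        exact hpre.2.2.2 hodd p hp (h2 ▸ h01)
      rw [List.map_congr_left (fun p hp => hz p hp)]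
      simp
    rw [hmain]
    simp [hzero]
  · have heven : (Way.length + 1) / 2 = Way.length / 2 := by omega
    rw [heven, hmain]
    simp

def count_raises : Claim_raises_count := by
  unfold Claim_raises_count
  constructor
  · intro Way point _ hr hp
    obtain ⟨_, _, _, hodd, p, hpmem, heq⟩ := hr
    exact hp.2.2.2 hodd p hpmem heq
  · refine ⟨by decide, by decide, by decide⟩
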